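-- pv_equiv track=rewrite | github.com/PengQ0203/Torch | CV/LBP.py | getHopCnt
-- ===== SOURCE A (Python) =====
-- def getHopCnt(num):
--     '''
--     :param num:8位的整形数，0-255
--     :return:
--     '''
--     if num > 255:
--         num = 255
--     elif num < 0:
--         num = 0
--
--     num_b = bin(num)
--     num_b = str(num_b)[2:]
--
--     # 补0
--     if len(num_b) < 8:
--         temp = []
--         for i in range(8-len(num_b)):
--             temp.append('0')
--         temp.extend(num_b)
--         num_b = temp
--
--     cnt = 0
--     for i in range(8):
--         if i == 0:
--             former = num_b[-1]
--         else:
--             former = num_b[i-1]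
--         if former == num_b[i]:
--             pass
--         else:
--             cnt += 1
--
--     return cnt
-- ===== SOURCE B (Python) =====
-- def getHopCnt(num):
--     if num > 255:
--         num = 255
--     elif num < 0:
--         num = 0
--     rot = ((num >> 1) | (num << 7)) & 0xFF
--     return bin(num ^ rot).count('1')
-- ===== Notes on version B (the rewrite author's own statement) =====
-- stated objective: idiomatic
-- what changed: Replaces the binary-string building, zero-padding loop and transition-counting loop with a closed-form bit rotation (rot = ((num>>1)|(num<<7))&0xFF) and a popcount of num^rot.
import Mathlib
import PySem

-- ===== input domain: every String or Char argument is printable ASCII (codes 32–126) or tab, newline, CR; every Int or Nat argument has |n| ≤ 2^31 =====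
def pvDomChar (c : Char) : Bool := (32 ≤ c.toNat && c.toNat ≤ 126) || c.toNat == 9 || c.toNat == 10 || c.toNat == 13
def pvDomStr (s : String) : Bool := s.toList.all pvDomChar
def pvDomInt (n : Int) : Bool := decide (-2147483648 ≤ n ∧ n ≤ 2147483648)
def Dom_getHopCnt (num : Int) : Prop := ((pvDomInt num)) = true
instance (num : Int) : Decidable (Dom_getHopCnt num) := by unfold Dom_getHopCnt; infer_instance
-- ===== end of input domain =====

-- B replaces A's binary-string building, zero-padding loop and 8-step transition loop
-- with a closed-form bit rotation (rot = ((num>>1)|(num<<7))&0xFF) and a popcount of num^rot.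


-- ===== PORT A =====
-- bin(n)[2:] as a list of '0'/'1' chars (n ≥ 0 always, since A clamps first)
-- structural fuel (n+1 steps always suffice since the argument halves each step)
def pvBinCharsAux : Nat → Nat → List Char
  | 0, _ => []
  | fuel + 1, n =>
    if n < 2 then [if n == 1 then '1' else '0']
    else pvBinCharsAux fuel (n / 2) ++ [if n % 2 == 1 then '1' else '0']

def pvBinChars (n : Nat) : List Char := pvBinCharsAux (n + 1) n

-- body of A after the clamp; indices are always in range (the list has exactly 8 chars
-- after the padding), so the '?' default of pyGet? is never used
def getHopCntCore (num : Int) : Int :=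
  let num_b := pvBinChars num.toNat
  let num_b := if num_b.length < 8
               then List.replicate (8 - num_b.length) '0' ++ num_b
               else num_b
  (List.range 8).foldl (fun cnt i =>
    let former := if i == 0 then (PySem.List.pyGet? num_b (-1)).getD '?'
                  else (PySem.List.pyGet? num_b ((i : Int) - 1)).getD '?'
    if former == (PySem.List.pyGet? num_b (i : Int)).getD '?' then cnt else cnt + 1) 0

def getHopCnt (num : Int) : Int :=
  getHopCntCore (if num > 255 then 255 else if num < 0 then 0 else num)

-- ===== PORT B =====
-- bin(x).count('1') for x ≥ 0
-- structural fuel (n+1 steps always suffice since the argument halves each step)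
def pvPopCountAux : Nat → Nat → Int
  | 0, _ => 0
  | fuel + 1, n => if n = 0 then 0 else (n % 2 : Int) + pvPopCountAux fuel (n / 2)

def pvPopCount (n : Nat) : Int := pvPopCountAux (n + 1) n

-- body of B after the clamp; num is nonnegative there, so Python's >> << | ^ & on it
-- coincide exactly with the Nat bit operations on num.toNat
def getHopCntAltCore (num : Int) : Int :=
  let n := num.toNat
  let rot := ((n >>> 1) ||| (n <<< 7)) &&& 0xFF
  pvPopCount (n ^^^ rot)

def getHopCnt_alt (num : Int) : Int :=
  getHopCntAltCore (if num > 255 then 255 else if num < 0 then 0 else num)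

-- ===== PRECONDITION & SPEC =====
def Spec_getHopCnt (num : Int) (out : Int) : Prop := out = getHopCnt_alt num
instance (num : Int) (out : Int) : Decidable (Spec_getHopCnt num out) := by unfold Spec_getHopCnt; infer_instance

-- ===== CLAIM (what is proved, stated in full; the proofs are below) =====
def Claim_equal_getHopCnt : Prop := ∀ (num : Int), Dom_getHopCnt num → Spec_getHopCnt num (getHopCnt num)

-- ===== LEMMAS AND PROOFS =====
-- the two cores agree on every clamped value
set_option maxRecDepth 4000 in
theorem core_eq : ∀ n : Nat, n < 256 → getHopCntCore (Int.ofNat n) = getHopCntAltCore (Int.ofNat n) := by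
  decide

-- ===== VERDICT (by name: the statement is the Claim_ definition above) =====
theorem getHopCnt_spec : Claim_equal_getHopCnt := by
  intro num _
  unfold Spec_getHopCnt getHopCnt getHopCnt_alt
  split_ifs with h1 h2
  · exact core_eq 255 (by omega)
  · exact core_eq 0 (by omega)
  · have hnum : num = Int.ofNat num.toNat := (Int.toNat_of_nonneg (by omega)).symm
    rw [hnum]
    exact core_eq num.toNat (by omega)
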